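-- pv_equiv track=rewrite | github.com/awishto-write/Wsu_CsCourses | Cpts355-Second/Cpts355_HW3/HW3.py | lookupVal2_helper
-- ===== SOURCE A (Python) =====
-- def lookupVal2_helper(tL,k, index):
--     element = tL[index]
--
--     # if k in tL[index][index]:
--     #     return tL[index][index][k]
--
--       # checking the dictionary at tL[index]
--     if k in element[1]: # or if k in tL[index][1]    # When k is that dictionary
--         return element[1][k] # or tL[index][1][k]    # Return the value of k
--
--     else :
--         if index == 0: # else if reached to the beginning of the list return None
--            return None
--         else: # else make the recursive call for index tL[index][0]
--            return lookupVal2_helper(tL, k, element[0])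
-- ===== SOURCE B (Python) =====
-- def lookupVal2_helper(tL, k, index):
--     # Phase 1: collect the chain of scope dictionaries from index toward the root,
--     # stopping at the root or at the first scope that holds k; the bound len(tL)+1
--     # covers any chain and ends the collection on a cyclic (corrupt) scope list.
--     scopes = []
--     i = index
--     for _ in range(len(tL) + 1):
--         parent, scope = tL[i]
--         scopes.append(scope)
--         if i == 0 or k in scope:
--             break
--         i = parent
--     # Phase 2: the nearest collected scope holding k supplies the value.
--     hit = next((scope for scope in scopes if k in scope), None)
--     return hit[k] if hit is not None else None
-- ===== Notes on version B (the rewrite author's own statement) =====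
-- stated objective: alternative
-- what changed: A resolves the key by unbounded tail recursion that checks each scope and immediately recurses; B is a two-phase iterative version: a bounded loop first collects the chain of scope dictionaries (stopping at the root or at the first scope holding the key), then a second pass returns the first collected binding, and a cyclic scope list yields None instead of unbounded recursion.
import Mathlib
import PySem

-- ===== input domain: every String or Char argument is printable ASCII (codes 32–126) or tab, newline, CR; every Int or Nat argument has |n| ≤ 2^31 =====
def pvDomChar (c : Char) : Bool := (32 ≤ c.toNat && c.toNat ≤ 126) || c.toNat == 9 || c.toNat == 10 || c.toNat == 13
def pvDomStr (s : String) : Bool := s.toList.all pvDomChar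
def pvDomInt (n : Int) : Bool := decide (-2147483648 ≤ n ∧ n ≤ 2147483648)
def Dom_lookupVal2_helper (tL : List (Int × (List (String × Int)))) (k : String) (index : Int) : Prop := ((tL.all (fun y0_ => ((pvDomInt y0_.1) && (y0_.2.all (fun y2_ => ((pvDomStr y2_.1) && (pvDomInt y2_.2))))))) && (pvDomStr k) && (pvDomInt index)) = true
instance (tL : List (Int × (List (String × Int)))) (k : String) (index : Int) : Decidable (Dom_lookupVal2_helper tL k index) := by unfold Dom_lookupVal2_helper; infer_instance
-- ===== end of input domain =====

-- B replaces A's unbounded tail recursion with a two-phase iterative version: a bounded loop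
-- collects the chain of scope dictionaries, a second pass returns the first binding of k
-- (alternative decomposition, same cost; B returns None on cyclic chains where A recurses forever).


-- ===== PORT A =====
-- A's tail recursion, with fuel bounding the depth: Python recurses without bound on
-- cyclic parent chains (RecursionError) and raises IndexError on out-of-range indices —
-- both outside Pre_, where the fuel-exhausted / pyGet?-none branches are never reached.
def lookupVal2_helper_go (tL : List (Int × (List (String × Int)))) (k : String) : Nat → Int → Option Int
  | 0, _ => none                                     -- unreachable under Pre_
  | fuel+1, index =>
    match PySem.List.pyGet? tL index with            -- element = tL[index]  (none = IndexError)
    | none => none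
    | some element =>
      match (PySem.Dict.mk element.2).get? k with    -- if k in element[1]:
      | some v => some v                             --     return element[1][k]
      | none =>
        if index = 0 then none                       -- if index == 0: return None
        else lookupVal2_helper_go tL k fuel element.1  -- recursive call on element[0]

def lookupVal2_helper (tL : List (Int × (List (String × Int)))) (k : String) (index : Int) : Option Int :=
  lookupVal2_helper_go tL k (tL.length + 1) index

-- ===== PORT B =====
-- Phase 1 of Source B: the for-loop over range(len(tL)+1) collecting the chain of scope
-- dictionaries, breaking at the root or at the first scope holding k (fuel = remaining
-- iterations; the pyGet?-none case is Python's IndexError, outside Pre_).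
def lookupVal2_collect (tL : List (Int × (List (String × Int)))) (k : String) :
    Nat → Int → List (List (String × Int))
  | 0, _ => []                                       -- the for-loop ran out (cyclic list)
  | fuel+1, i =>
    match PySem.List.pyGet? tL i with                -- parent, scope = tL[i]
    | none => []                                     -- IndexError (outside Pre_)
    | some (parent, scope) =>
      if i = 0 ∨ (PySem.Dict.mk scope).contains k = true  -- scopes.append(scope); break?
      then [scope]
      else scope :: lookupVal2_collect tL k fuel parent

-- Phase 2 of Source B: hit = next((scope for scope in scopes if k in scope), None);
-- return hit[k] if hit is not None else None.
def lookupVal2_helper_alt (tL : List (Int × (List (String × Int)))) (k : String) (index : Int) : Option Int :=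
  match (lookupVal2_collect tL k (tL.length + 1) index).find?
      (fun scope => (PySem.Dict.mk scope).contains k) with
  | some hit => (PySem.Dict.mk hit).get? k   -- hit[k] (contains k, so this is some)
  | none => none

-- ===== PRECONDITION & SPEC =====
-- the parent-pointer map of the scope list (a function of the input only)
def pvNext (tL : List (Int × (List (String × Int)))) (i : Int) : Int :=
  ((PySem.List.pyGet? tL i).map Prod.fst).getD i

-- the walk stops at raw index i: i is the root or the scope at i holds k
def pvStops (tL : List (Int × (List (String × Int)))) (k : String) (i : Int) : Prop :=
  i = 0 ∨ ((PySem.List.pyGet? tL i).any (fun e => (PySem.Dict.mk e.2).contains k)) = true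

-- Pre_ holds exactly when A returns: following the parent pointers from index, every index
-- up to the first stopping point is in range (no IndexError) and a stopping point (the root
-- or a scope holding k) is reached within len(tL) steps — on an in-range chain with no
-- stopping point the raw indices must repeat within len(tL) steps (they are all parent
-- pointers or the start), i.e. the chain is cyclic and A recurses forever.
def Pre_lookupVal2_helper (tL : List (Int × (List (String × Int)))) (k : String) (index : Int) : Prop :=
  ∃ n ∈ List.range (tL.length + 1),
    (∀ m ∈ List.range (n + 1), -(tL.length : Int) ≤ (pvNext tL)^[m] index ∧ (pvNext tL)^[m] index < tL.length) ∧
    pvStops tL k ((pvNext tL)^[n] index)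
instance (tL : List (Int × (List (String × Int)))) (k : String) (index : Int) : Decidable (Pre_lookupVal2_helper tL k index) := by unfold Pre_lookupVal2_helper pvStops; infer_instance

def pvWitness_lookupVal2_helper : (List (Int × (List (String × Int)))) × String × Int :=
  ([(0, [("x", 1)]), (0, [("y", 2)])], "y", 1)

def Spec_lookupVal2_helper (tL : List (Int × (List (String × Int)))) (k : String) (index : Int) (out : Option Int) : Prop := out = lookupVal2_helper_alt tL k index
instance (tL : List (Int × (List (String × Int)))) (k : String) (index : Int) (out : Option Int) : Decidable (Spec_lookupVal2_helper tL k index out) := by unfold Spec_lookupVal2_helper; infer_instance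

-- ===== CLAIM (what is proved, stated in full; the proofs are below) =====
def Claim_equal_lookupVal2_helper : Prop := ∀ (tL : List (Int × (List (String × Int)))) (k : String) (index : Int), Dom_lookupVal2_helper tL k index → Pre_lookupVal2_helper tL k index → Spec_lookupVal2_helper tL k index (lookupVal2_helper tL k index)

-- ===== LEMMAS AND PROOFS =====

-- proof-side abbreviation for B's phase 2 applied to a collected chain
def lookupVal2_pick (k : String) (scopes : List (List (String × Int))) : Option Int :=
  match scopes.find? (fun scope => (PySem.Dict.mk scope).contains k) with
  | some hit => (PySem.Dict.mk hit).get? k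
  | none => none

-- both ports agree given any fuel large enough to reach the first stopping point,
-- provided the walk stays in range up to it
lemma lookupVal2_go_eq_pick_collect
    (tL : List (Int × (List (String × Int)))) (k : String) :
    ∀ (fuel : Nat) (i : Int) (n : Nat), n < fuel →
    (∀ m : Nat, m ≤ n → -(tL.length : Int) ≤ (pvNext tL)^[m] i ∧ (pvNext tL)^[m] i < tL.length) →
    pvStops tL k ((pvNext tL)^[n] i) →
    lookupVal2_helper_go tL k fuel i = lookupVal2_pick k (lookupVal2_collect tL k fuel i) := by
  intro fuel
  induction fuel with
  | zero => intro i n h; omega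
  | succ fuel ih =>
    intro i n hn hrange hstop
    have hin : -(tL.length : Int) ≤ i ∧ i < tL.length := by
      have := hrange 0 (Nat.zero_le _); simpa using this
    obtain ⟨e, hget⟩ : ∃ e, PySem.List.pyGet? tL i = some e := by
      rcases h : PySem.List.pyGet? tL i with _ | e
      · have := (PySem.List.pyGet?_eq_none_iff tL i).mp h
        unfold PySem.Raise.InRange at this
        omega
      · exact ⟨e, rfl⟩
    have hnext : pvNext tL i = e.1 := by simp [pvNext, hget]
    by_cases hstop0 : pvStops tL k i
    · -- the walk stops immediately: the collected chain is the single scope e.2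
      rcases hd : (PySem.Dict.mk e.2).get? k with _ | v
      · -- k not in the scope, so the stop is the root i = 0; find? misses, both give none
        have hz : i = 0 := by
          rcases hstop0 with hz | hc
          · exact hz
          · rw [hget] at hc
            simp only [Option.any_some, PySem.Dict.contains_eq_isSome_get?, hd] at hc
            cases hc
        subst hz
        simp [lookupVal2_helper_go, lookupVal2_collect, hget, lookupVal2_pick,
          List.find?, PySem.Dict.contains_eq_isSome_get?, hd]
      · -- k is in the scope: A returns it, find? picks the scope
        simp [lookupVal2_helper_go, lookupVal2_collect, hget, hd, lookupVal2_pick,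
          PySem.Dict.contains_eq_isSome_get?]
    · -- no stop here: i ≠ 0, k not in the scope; both ports continue at e.1
      have hz : i ≠ 0 := fun h => hstop0 (Or.inl h)
      have hd : (PySem.Dict.mk e.2).get? k = none := by
        rcases h : (PySem.Dict.mk e.2).get? k with _ | v
        · rfl
        · exact absurd (Or.inr (by simp [hget, PySem.Dict.contains_eq_isSome_get?, h])) hstop0
      have hn1 : 1 ≤ n := by
        rcases Nat.eq_zero_or_pos n with h0 | h1
        · subst h0; simp at hstop; exact absurd hstop hstop0
        · exact h1
      have hrec := ih e.1 (n - 1) (by omega)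
        (fun m hm => by
          have := hrange (m + 1) (by omega)
          rwa [Function.iterate_succ_apply, hnext] at this)
        (by
          have : (pvNext tL)^[n] i = (pvNext tL)^[n - 1] (pvNext tL i) := by
            rw [← Function.iterate_succ_apply]; congr 1; omega
          rwa [this, hnext] at hstop)
      have hcond : ¬ (i = 0 ∨ (PySem.Dict.mk e.2).contains k = true) := by
        rintro (h | h)
        · exact hz h
        · rw [PySem.Dict.contains_eq_isSome_get?, hd] at h; cases h
      rcases e with ⟨parent, scope⟩
      simp only at hd hrec
      simp only [lookupVal2_helper_go, lookupVal2_collect, hget, hd, if_neg hz,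
        if_neg hcond]
      rw [hrec, lookupVal2_pick, lookupVal2_pick,
        List.find?_cons_of_neg (by simp [PySem.Dict.contains_eq_isSome_get?, hd])]

-- ===== VERDICT (by name: the statement is the Claim_ definition above) =====
theorem lookupVal2_helper_spec : Claim_equal_lookupVal2_helper := by
  intro tL k index _ hpre
  obtain ⟨n, hn, hrange, hstop⟩ := hpre
  have hn' : n < tL.length + 1 := List.mem_range.mp hn
  unfold Spec_lookupVal2_helper lookupVal2_helper
  have halt : lookupVal2_helper_alt tL k index
      = lookupVal2_pick k (lookupVal2_collect tL k (tL.length + 1) index) := rfl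
  rw [halt]
  exact lookupVal2_go_eq_pick_collect tL k (tL.length + 1) index n hn'
    (fun m hm => hrange m (List.mem_range.mpr (by omega))) hstop
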